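-- pv_equiv track=rewrite | github.com/fractal-robot/scholar | temp/bonus.py | trouverMeilleureSousChaineRepetee
-- ===== SOURCE A (Python) =====
-- def trouverSousChainesRepetees(sequenceADN: str) -> list:
--     """
--     Cherche toutes les chaines de caracteres qui se repetent dans la sequence ADN et les renvoit dans une liste
--
--     Entrée:
--         sequenceADN (string): la séquence ADN
--     Sortie:
--         Tableau (array): les sous-chaînes répétées dans la séquence ADN
--     """
--
--     sousChainesRepetees = []
--
--     for i in range(1, len(sequenceADN)):
--         for j in range(0, len(sequenceADN) - i + 1):
--             sousChaine = sequenceADN[j:j+i]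
--             if sousChaine in sequenceADN[j+i:]:
--                 sousChainesRepetees.append(sousChaine)
--
--     return sousChainesRepetees
--
-- def compterOccurencesDansListe(liste: list, elementCherche: str) -> int:
--     """
--     Compte les occurences d'un element dans une liste
--
--     Entree:
--         liste (liste): La liste dans laquelle on souhaite compter le nombre d'occurences
--         elementCherche (string): L'element dont on souhaite compter le nombre d'occurences
--
--     Sortie:
--         entier: Nombre d'occurences de cet element dans la liste
--     """
--
--     compteur = 0
--
--     for element in liste:
--         if element == elementCherche:
--             compteur += 1
--
--     return compteur
--
-- def trouverMeilleureSousChaineRepetee(sequenceADN: str) -> str: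
--     """
--     Cherche la chaine de caracteres avec le meilleur score (taille de la chaine * nombre de repetitions) parmis toutes celles qui se repetent dans la sequence ADN
--
--     Entrée :
--         sequenceADN (string): la séquence ADN
--     Sortie :
--         string: la sous-chaîne répétée dans la séquence ADN avec le meilleur score
--     """
--
--     sousChainesRepetees = trouverSousChainesRepetees(sequenceADN)
--
--     if not sousChainesRepetees:
--         return "Aucunes sous-chaînes répétées trouvées."
--
--     meilleure_chaine = ""
--     meilleur_score = -1
--
--     for sousChaine in sousChainesRepetees:
--         score = (compterOccurencesDansListe(sousChainesRepetees, sousChaine)+1) * len(sousChaine) # On rajoute un pour compter pour l'occurence originelle qui a permit de compter cette chaine comme etant repetee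
--         if score > meilleur_score:
--             meilleur_score = score
--             meilleure_chaine = sousChaine
--
--     return meilleure_chaine
-- ===== SOURCE B (Python) =====
-- def trouverMeilleureSousChaineRepetee(sequenceADN: str) -> str:
--     # For each length, a single right-to-left pass with a dict of the right-most
--     # later start of each substring replaces A's inner substring-containment scan over the suffix; a dict
--     # counter built once replaces A's quadratic per-element counting pass.
--     n = len(sequenceADN)
--     repetees = []
--     for i in range(1, n):
--         plusTard = {}  # sous-chaine -> position de depart la plus a droite deja vue
--         bloc = []
--         for j in range(n - i, -1, -1):
--             s = sequenceADN[j:j+i]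
--             if plusTard.get(s, -1) >= j + i:
--                 bloc.append(s)
--             if s not in plusTard:
--                 plusTard[s] = j
--         repetees.extend(reversed(bloc))
--     if not repetees:
--         return "Aucunes sous-chaînes répétées trouvées."
--     compte = {}
--     for s in repetees:
--         compte[s] = compte.get(s, 0) + 1
--     meilleure, meilleur_score = "", -1
--     for s, c in compte.items():
--         score = (c + 1) * len(s)
--         if score > meilleur_score:
--             meilleur_score = score
--             meilleure = s
--     return meilleure
-- ===== Notes on version B (the rewrite author's own statement) =====
-- stated objective: faster
-- what changed: per length, one right-to-left pass with a dict of each substring's right-most later start replaces the inner substring-containment scan over the suffix, and a dict counter built once plus a single pass over its distinct items replaces the quadratic per-element counting loop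
import Mathlib
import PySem

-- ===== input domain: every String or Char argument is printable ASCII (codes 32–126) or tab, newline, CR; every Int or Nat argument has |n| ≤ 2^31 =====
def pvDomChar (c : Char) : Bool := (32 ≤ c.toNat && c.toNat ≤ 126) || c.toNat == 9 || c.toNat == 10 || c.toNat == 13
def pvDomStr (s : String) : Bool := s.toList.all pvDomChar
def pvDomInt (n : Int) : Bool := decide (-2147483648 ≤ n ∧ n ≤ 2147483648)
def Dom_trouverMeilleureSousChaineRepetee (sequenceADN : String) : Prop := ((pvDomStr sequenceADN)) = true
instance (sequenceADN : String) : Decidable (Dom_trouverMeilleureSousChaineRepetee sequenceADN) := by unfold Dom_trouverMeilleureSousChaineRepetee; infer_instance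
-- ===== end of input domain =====

-- B: per length, a right-to-left pass with a dict of right-most later starts replaces the inner
-- substring-in-suffix scan, and a dict counter + one pass over its distinct items replaces the
-- quadratic counting loop (measured faster).


-- ===== PORT A =====
def trouverSousChainesRepetees (cs : List Char) : List (List Char) :=
  (PySem.List.pyRange 1 (cs.length : Int) 1).foldl (fun acc i =>
    (PySem.List.pyRange 0 ((cs.length : Int) - i + 1) 1).foldl (fun acc2 j =>
      let sousChaine := PySem.List.slice cs (some j) (some (j + i))
      if PySem.Chars.isIn sousChaine (PySem.List.slice cs (some (j + i)) none)
      then acc2 ++ [sousChaine] else acc2) acc) []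

def compterOccurencesDansListe (liste : List (List Char)) (elementCherche : List Char) : Int :=
  liste.foldl (fun compteur element =>
    if element == elementCherche then compteur + 1 else compteur) 0

def trouverMeilleureSousChaineRepetee (sequenceADN : String) : String :=
  let sousChainesRepetees := trouverSousChainesRepetees sequenceADN.toList
  if sousChainesRepetees = [] then "Aucunes sous-chaînes répétées trouvées."
  else
    let r := sousChainesRepetees.foldl (fun (st : List Char × Int) sousChaine =>
      let score := (compterOccurencesDansListe sousChainesRepetees sousChaine + 1) * (sousChaine.length : Int)
      if score > st.2 then (sousChaine, score) else st) ([], -1)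
    String.ofList r.1

-- ===== PORT B =====
-- inner right-to-left pass for one length i: state = (dict of right-most later start, bloc)
def pvAltRepetees (cs : List Char) : List (List Char) :=
  (PySem.List.pyRange 1 (cs.length : Int) 1).foldl (fun acc i =>
    let st := (PySem.List.pyRange ((cs.length : Int) - i) (-1) (-1)).foldl
      (fun (st : PySem.Dict (List Char) Int × List (List Char)) j =>
        let s := PySem.List.slice cs (some j) (some (j + i))
        let st2 := if st.1.getD s (-1) ≥ j + i then (st.1, st.2 ++ [s]) else st
        if st2.1.contains s then st2 else (st2.1.insert s j, st2.2))
      (PySem.Dict.empty, [])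
    acc ++ st.2.reverse) []

def trouverMeilleureSousChaineRepetee_alt (sequenceADN : String) : String :=
  let repetees := pvAltRepetees sequenceADN.toList
  if repetees = [] then "Aucunes sous-chaînes répétées trouvées."
  else
    let compte := repetees.foldl (fun d s => d.insert s (d.getD s 0 + 1)) PySem.Dict.empty
    let r := compte.items.foldl (fun (st : List Char × Int) p =>
      let score := (p.2 + 1) * (p.1.length : Int)
      if score > st.2 then (p.1, score) else st) ([], -1)
    String.ofList r.1

-- ===== PRECONDITION & SPEC =====
def Spec_trouverMeilleureSousChaineRepetee (sequenceADN : String) (out : String) : Prop := out = trouverMeilleureSousChaineRepetee_alt sequenceADN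
instance (sequenceADN : String) (out : String) : Decidable (Spec_trouverMeilleureSousChaineRepetee sequenceADN out) := by unfold Spec_trouverMeilleureSousChaineRepetee; infer_instance

-- ===== CLAIM (what is proved, stated in full; the proofs are below) =====
def Claim_equal_trouverMeilleureSousChaineRepetee : Prop := ∀ (sequenceADN : String), Dom_trouverMeilleureSousChaineRepetee sequenceADN → Spec_trouverMeilleureSousChaineRepetee sequenceADN (trouverMeilleureSousChaineRepetee sequenceADN)

-- ===== LEMMAS AND PROOFS =====

-- substring of length i starting at j (as both ports slice it)
def pvSub (cs : List Char) (i j : Int) : List Char := PySem.List.slice cs (some j) (some (j + i))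

-- the descending position list [m, m-1, …, m-u+1]
def pvDlist (m u : Nat) : List Int := (List.range u).map (fun k : Nat => (m : Int) - (k : Int))

-- "the substring at j occurs again at some start ≥ j+i"
def pvCond (cs : List Char) (i j : Int) : Prop :=
  ∃ p : Int, j + i ≤ p ∧ p ≤ (cs.length : Int) - i ∧ pvSub cs i p = pvSub cs i j

-- computable form of pvCond: right-most match over the full descending list
def pvCondB (cs : List Char) (i j : Int) : Bool :=
  decide ((((pvDlist (((cs.length : Int) - i).toNat) ((((cs.length : Int) - i).toNat) + 1)).find?
    (fun p => pvSub cs i p == pvSub cs i j)).getD (-1)) ≥ j + i)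

theorem pvSub_natCast (cs : List Char) (iN jN : Nat) :
    pvSub cs (iN : Int) (jN : Int) = (cs.drop jN).take iN := by
  simpa [pvSub] using PySem.List.slice_natCast_add cs jN iN

theorem pvDlist_succ (m u : Nat) : pvDlist m (u + 1) = pvDlist m u ++ [(m : Int) - u] := by
  simp [pvDlist, List.range_succ]

theorem mem_pvDlist {m u : Nat} {x : Int} : x ∈ pvDlist m u ↔ (m : Int) - u < x ∧ x ≤ m := by
  simp only [pvDlist, List.mem_map, List.mem_range]
  constructor
  · rintro ⟨k, hk, hkx⟩; omega
  · intro h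
    refine ⟨((m : Int) - x).toNat, by omega, by omega⟩

theorem pvFind_max {P : Int → Bool} {m u : Nat} {p : Int}
    (h : (pvDlist m u).find? P = some p) : ∀ q ∈ pvDlist m u, P q = true → q ≤ p := by
  induction u with
  | zero => intro q hq; simp [pvDlist] at hq
  | succ u ih =>
    rw [pvDlist_succ] at h ⊢
    rw [List.find?_append] at h
    intro q hq hPq
    rcases List.mem_append.1 hq with hq | hq
    · cases h1 : (pvDlist m u).find? P with
      | some p' =>
        rw [h1] at h; simp [Option.or] at h; subst h; exact ih h1 q hq hPq
      | none =>
        rw [List.find?_eq_none] at h1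
        exact absurd hPq (h1 q hq)
    · simp at hq; subst hq
      cases h1 : (pvDlist m u).find? P with
      | some p' =>
        rw [h1] at h; simp [Option.or] at h; subst h
        have := mem_pvDlist.1 (List.mem_of_find?_eq_some h1)
        omega
      | none =>
        rw [h1] at h; simp [Option.or] at h
        rcases h with ⟨h, rfl⟩; omega

theorem pvFindD_iff (cs : List Char) (i : Int) (hi : 1 ≤ i) (m u : Nat)
    (hm : (m : Int) = (cs.length : Int) - i) (j : Int) (hj : 0 ≤ j)
    (hju : (m : Int) - u ≤ j) :
    ((((pvDlist m u).find? (fun p => pvSub cs i p == pvSub cs i j)).getD (-1)) ≥ j + i)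
      ↔ pvCond cs i j := by
  cases hf : (pvDlist m u).find? (fun p => pvSub cs i p == pvSub cs i j) with
  | none =>
    simp only [Option.getD_none]
    constructor
    · intro h; omega
    · rintro ⟨p, hp1, hp2, hp3⟩
      rw [List.find?_eq_none] at hf
      have hpmem : p ∈ pvDlist m u := mem_pvDlist.2 ⟨by omega, by omega⟩
      have := hf p hpmem
      simp [hp3] at this
  | some p =>
    simp only [Option.getD_some]
    have hmem := mem_pvDlist.1 (List.mem_of_find?_eq_some hf)
    have hP := List.find?_some hf
    rw [beq_iff_eq] at hP
    constructor
    · intro h; exact ⟨p, h, by omega, hP⟩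
    · rintro ⟨q, hq1, hq2, hq3⟩
      have hqmem : q ∈ pvDlist m u := mem_pvDlist.2 ⟨by omega, by omega⟩
      have := pvFind_max hf q hqmem (by simp [hq3])
      omega

theorem pvCondB_iff (cs : List Char) (i : Int) (hi : 1 ≤ i) (m : Nat)
    (hm : (m : Int) = (cs.length : Int) - i) (j : Int) (hj : 0 ≤ j) :
    pvCondB cs i j = true ↔ pvCond cs i j := by
  have hm' : ((cs.length : Int) - i).toNat = m := by omega
  simp only [pvCondB, hm', decide_eq_true_eq]
  exact pvFindD_iff cs i hi m (m + 1) hm j hj (by omega)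

-- A's membership test equals pvCond
theorem pvCondA_iff (cs : List Char) (iN jN : Nat) (hi : 1 ≤ iN) (hle : jN + iN ≤ cs.length) :
    (PySem.Chars.isIn ((cs.drop jN).take iN) (cs.drop (jN + iN)) = true)
      ↔ pvCond cs (iN : Int) (jN : Int) := by
  have hlen : ((cs.drop jN).take iN).length = iN := by
    simp [List.length_take, List.length_drop]; omega
  rw [← PySem.Chars.exists_prefix_drop_iff_isIn]
  constructor
  · rintro ⟨k, hpre⟩
    rw [List.drop_drop] at hpre
    have hq : jN + iN + k + iN ≤ cs.length := by
      have := hpre.length_le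
      simp [List.length_drop, hlen] at this
      omega
    refine ⟨((jN + iN + k : Nat) : Int), by push_cast; omega, by push_cast; omega, ?_⟩
    rw [pvSub_natCast, pvSub_natCast]
    have := List.prefix_iff_eq_take.1 hpre
    rw [hlen] at this
    exact this.symm
  · rintro ⟨p, hp1, hp2, hp3⟩
    have hp0 : 0 ≤ p := by omega
    have hpq : p = ((p.toNat : Nat) : Int) := by omega
    rw [hpq, pvSub_natCast, pvSub_natCast] at hp3
    refine ⟨p.toNat - (jN + iN), ?_⟩
    rw [List.drop_drop]
    have harith : jN + iN + (p.toNat - (jN + iN)) = p.toNat := by omega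
    rw [harith, ← hp3]
    exact List.take_prefix _ _

-- the inner right-to-left loop of B, characterised
theorem pvInner (cs : List Char) (i : Int) (hi : 1 ≤ i) (m : Nat)
    (hm : (m : Int) = (cs.length : Int) - i) (u : Nat) (hu : u ≤ m + 1) :
    (∀ s, ((pvDlist m u).foldl
      (fun (st : PySem.Dict (List Char) Int × List (List Char)) j =>
        let s := PySem.List.slice cs (some j) (some (j + i))
        let st2 := if st.1.getD s (-1) ≥ j + i then (st.1, st.2 ++ [s]) else st
        if st2.1.contains s then st2 else (st2.1.insert s j, st2.2))
      (PySem.Dict.empty, [])).1.get? s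
        = (pvDlist m u).find? (fun p => pvSub cs i p == s)) ∧
    ((pvDlist m u).foldl
      (fun (st : PySem.Dict (List Char) Int × List (List Char)) j =>
        let s := PySem.List.slice cs (some j) (some (j + i))
        let st2 := if st.1.getD s (-1) ≥ j + i then (st.1, st.2 ++ [s]) else st
        if st2.1.contains s then st2 else (st2.1.insert s j, st2.2))
      (PySem.Dict.empty, [])).2
        = ((pvDlist m u).filter (pvCondB cs i)).map (pvSub cs i) := by
  induction u with
  | zero =>
    constructor
    · intro s; simp [pvDlist, PySem.Dict.get?_empty]
    · simp [pvDlist]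
  | succ u ih =>
    obtain ⟨ih1, ih2⟩ := ih (by omega)
    set F := (fun (st : PySem.Dict (List Char) Int × List (List Char)) j =>
        let s := PySem.List.slice cs (some j) (some (j + i))
        let st2 := if st.1.getD s (-1) ≥ j + i then (st.1, st.2 ++ [s]) else st
        if st2.1.contains s then st2 else (st2.1.insert s j, st2.2)) with hF
    set j : Int := (m : Int) - u with hj
    have hj0 : 0 ≤ j := by omega
    rw [pvDlist_succ, List.foldl_append, List.foldl_cons, List.foldl_nil, ← hj]
    rcases hDB : (pvDlist m u).foldl F (PySem.Dict.empty, []) with ⟨D, B⟩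
    rw [hDB] at ih1 ih2
    simp only at ih1 ih2
    -- the dict test at j equals pvCondB cs i j
    have hs0 : PySem.List.slice cs (some j) (some (j + i)) = pvSub cs i j := rfl
    have htest : (D.getD (pvSub cs i j) (-1) ≥ j + i) ↔ pvCondB cs i j = true := by
      rw [PySem.Dict.getD_eq_get?_getD, ih1 (pvSub cs i j)]
      rw [pvFindD_iff cs i hi m u hm j hj0 (by omega)]
      exact (pvCondB_iff cs i hi m hm j hj0).symm
    have hcontains : D.contains (pvSub cs i j) = ((pvDlist m u).find? (fun p => pvSub cs i p == pvSub cs i j)).isSome := by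
      rw [PySem.Dict.contains_eq_isSome_get?, ih1]
    have hfind_append : ∀ s : List Char,
        (pvDlist m u ++ [j]).find? (fun p => pvSub cs i p == s)
          = (((pvDlist m u).find? (fun p => pvSub cs i p == s)).or
             (if pvSub cs i j == s then some j else none)) := by
      intro s
      rw [List.find?_append]
      congr 1
      cases hbe : pvSub cs i j == s <;> simp [List.find?, hbe]
    have hfilter_append :
        (pvDlist m u ++ [j]).filter (pvCondB cs i)
          = (pvDlist m u).filter (pvCondB cs i) ++ (if pvCondB cs i j = true then [j] else []) := by
      rw [List.filter_append]
      congr 1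
      by_cases h : pvCondB cs i j = true <;> simp [h]
    by_cases hcond : D.getD (pvSub cs i j) (-1) ≥ j + i
    · -- repeated: bloc gains sub j; and then the substring is already in the dict
      have hB : pvCondB cs i j = true := htest.1 hcond
      have hsome : ((pvDlist m u).find? (fun p => pvSub cs i p == pvSub cs i j)).isSome := by
        cases hf : (pvDlist m u).find? (fun p => pvSub cs i p == pvSub cs i j) with
        | none => rw [PySem.Dict.getD_eq_get?_getD, ih1, hf] at hcond; simp at hcond; omega
        | some p => simp
      have hc : D.contains (pvSub cs i j) = true := by rw [hcontains]; exact hsome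
      have hstep : F (D, B) j = (D, B ++ [pvSub cs i j]) := by
        rw [hF]; simp only [hs0]
        rw [if_pos hcond]
        simp [hc]
      rw [hstep]
      constructor
      · intro s
        simp only
        rw [hfind_append s, ih1 s]
        cases hf : (pvDlist m u).find? (fun p => pvSub cs i p == s) with
        | some p => simp
        | none =>
          by_cases hseq : pvSub cs i j == s
          · exfalso
            have hse : s = pvSub cs i j := (beq_iff_eq.1 hseq).symm
            rw [← hse, hf] at hsome; simp at hsome
          · simp [hseq]
      · simp only
        rw [ih2, hfilter_append, if_pos hB]
        simp
    · -- not repeated here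
      have hB : ¬ pvCondB cs i j = true := fun h => hcond (htest.2 h)
      have hnone : (pvDlist m u).find? (fun p => pvSub cs i p == pvSub cs i j) = none ∨
          ((pvDlist m u).find? (fun p => pvSub cs i p == pvSub cs i j)).isSome := by
        cases hf : (pvDlist m u).find? (fun p => pvSub cs i p == pvSub cs i j)
        · exact Or.inl rfl
        · exact Or.inr (by simp)
      by_cases hc : D.contains (pvSub cs i j) = true
      · -- already present: dict unchanged, bloc unchanged
        have hstep : F (D, B) j = (D, B) := by
          rw [hF]; simp only [hs0]
          rw [if_neg hcond]
          simp [hc]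
        rw [hstep]
        constructor
        · intro s
          simp only
          rw [hfind_append s, ih1 s]
          cases hf : (pvDlist m u).find? (fun p => pvSub cs i p == s) with
          | some p => simp
          | none =>
            by_cases hseq : pvSub cs i j == s
            · exfalso
              have hse : s = pvSub cs i j := (beq_iff_eq.1 hseq).symm
              rw [hcontains, ← hse, hf] at hc; simp at hc
            · simp [hseq]
        · simp only
          rw [ih2, hfilter_append, if_neg hB]
          simp
      · -- new key: insert it
        have hstep : F (D, B) j = (D.insert (pvSub cs i j) j, B) := by
          rw [hF]; simp only [hs0]
          rw [if_neg hcond]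
          simp [hc]
        rw [hstep]
        have hfnone : (pvDlist m u).find? (fun p => pvSub cs i p == pvSub cs i j) = none := by
          rw [hcontains] at hc
          cases hf : (pvDlist m u).find? (fun p => pvSub cs i p == pvSub cs i j) with
          | some p => rw [hf] at hc; simp at hc
          | none => rfl
        constructor
        · intro s
          simp only
          rw [hfind_append s, PySem.Dict.get?_insert]
          by_cases hse : s = pvSub cs i j
          · rw [if_pos hse, hse, hfnone]
            simp
          · rw [if_neg hse, ih1 s]
            have hseq : (pvSub cs i j == s) = false := by
              simp; exact fun h => hse h.symm
            rw [hseq]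
            simp
        · simp only
          rw [ih2, hfilter_append, if_neg hB]
          simp

-- both repeated-substring lists coincide
theorem pvRepetees_eq (cs : List Char) : pvAltRepetees cs = trouverSousChainesRepetees cs := by
  unfold pvAltRepetees trouverSousChainesRepetees
  apply PySem.List.foldl_congr_mem
  intro acc i hi'
  obtain ⟨h1, h2⟩ := PySem.List.mem_pyRange_one.1 hi'
  have hm : ((((cs.length : Int) - i).toNat : Nat) : Int) = (cs.length : Int) - i := by omega
  set m : Nat := ((cs.length : Int) - i).toNat with hmdef
  have hrange : PySem.List.pyRange ((cs.length : Int) - i) (-1) (-1) = pvDlist m (m + 1) := by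
    rw [← hm, PySem.List.pyRange_neg_one]
    simp only [pvDlist]
    congr 1
  rw [hrange]
  obtain ⟨-, hB⟩ := pvInner cs i h1 m hm (m + 1) (le_refl _)
  simp only
  rw [hB]
  rw [PySem.List.foldl_append_if
    (fun j => PySem.Chars.isIn (PySem.List.slice cs (some j) (some (j + i)))
      (PySem.List.slice cs (some (j + i)) none))
    (fun j => PySem.List.slice cs (some j) (some (j + i)))]
  congr 1
  have hrev : pvDlist m (m + 1) = (PySem.List.pyRange 0 ((cs.length : Int) - i + 1) 1).reverse := by
    rw [← hrange, PySem.List.pyRange_neg_one_eq_reverse]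
    norm_num
  rw [hrev, List.filter_reverse, List.map_reverse, List.reverse_reverse]
  have hfc : List.filter (pvCondB cs i) (PySem.List.pyRange 0 ((cs.length : Int) - i + 1) 1)
      = List.filter (fun j => PySem.Chars.isIn (PySem.List.slice cs (some j) (some (j + i)))
          (PySem.List.slice cs (some (j + i)) none)) (PySem.List.pyRange 0 ((cs.length : Int) - i + 1) 1) := by
    apply List.filter_congr
    intro j hj
    obtain ⟨hj0, hj1⟩ := PySem.List.mem_pyRange_one.1 hj
    have hji : ((j.toNat : Nat) : Int) = j := by omega
    have hii : ((i.toNat : Nat) : Int) = i := by omega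
    rw [Bool.eq_iff_iff]
    rw [pvCondB_iff cs i h1 m hm j hj0]
    have hslice1 : PySem.List.slice cs (some j) (some (j + i)) = (cs.drop j.toNat).take i.toNat := by
      have h := pvSub_natCast cs i.toNat j.toNat
      simp only [pvSub] at h
      rw [hji, hii] at h
      exact h
    have hslice2 : PySem.List.slice cs (some (j + i)) none = cs.drop (j.toNat + i.toNat) := by
      rw [PySem.List.slice_from cs (by omega : (0:Int) ≤ j + i)]
      congr 1
      omega
    rw [hslice1, hslice2]
    rw [pvCondA_iff cs i.toNat j.toNat (by omega) (by omega)]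
    rw [hji, hii]
  rw [hfc]
  apply List.map_congr_left
  intro j _
  rfl

-- best-scoring scan ignores later duplicates: fold over the dedup is the same
def pvRS {α : Type} [BEq α] (seen : List α) : List α → List α
  | [] => []
  | x :: l => if seen.contains x then pvRS seen l else x :: pvRS (x :: seen) l

theorem pvRS_congr {α : Type} [BEq α] (l : List α) (s1 s2 : List α)
    (h : ∀ x, s1.contains x = s2.contains x) : pvRS s1 l = pvRS s2 l := by
  induction l generalizing s1 s2 with
  | nil => rfl
  | cons x l ih =>
    simp only [pvRS, h x]
    by_cases hx : s2.contains x = true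
    · rw [if_pos hx, if_pos hx]; exact ih s1 s2 h
    · rw [if_neg hx, if_neg hx]
      refine congrArg _ (ih _ _ ?_)
      intro y; simp [List.contains_cons, h y]

theorem pvOfList_eq_RS {α : Type} [BEq α] (l acc : List α) :
    l.foldl PySem.Set.add acc = acc ++ pvRS acc l := by
  induction l generalizing acc with
  | nil => simp [pvRS]
  | cons x l ih =>
    simp only [List.foldl_cons, pvRS]
    by_cases hx : acc.contains x = true
    · rw [if_pos hx]
      have : PySem.Set.add acc x = acc := by simp [PySem.Set.add, hx]
      rw [this, ih]
    · rw [if_neg hx]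
      have : PySem.Set.add acc x = acc ++ [x] := by simp [PySem.Set.add, hx]
      rw [this, ih]
      rw [pvRS_congr l (acc ++ [x]) (x :: acc) (by
        intro y; simp [List.contains_cons, List.contains_append, Bool.or_comm])]
      simp

theorem pvBest_RS {α : Type} [BEq α] [LawfulBEq α] (f : α → Int) (l : List α) :
    ∀ (seen : List α) (st : α × Int), (∀ x ∈ seen, f x ≤ st.2) →
    l.foldl (fun st x => if f x > st.2 then (x, f x) else st) st
      = (pvRS seen l).foldl (fun st x => if f x > st.2 then (x, f x) else st) st := by
  induction l with
  | nil => intro seen st _; rfl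
  | cons x l ih =>
    intro seen st hseen
    simp only [List.foldl_cons, pvRS]
    by_cases hx : seen.contains x = true
    · rw [if_pos hx]
      have hmem : x ∈ seen := by simpa using hx
      have hfx : ¬ (f x > st.2) := not_lt.2 (hseen x hmem)
      rw [if_neg hfx]
      exact ih seen st hseen
    · rw [if_neg hx]
      simp only [List.foldl_cons]
      by_cases hgt : f x > st.2
      · rw [if_pos hgt]
        exact ih (x :: seen) (x, f x) (by
          intro y hy; rcases List.mem_cons.1 hy with rfl | hy
          · exact le_refl _
          · exact le_of_lt (lt_of_le_of_lt (hseen y hy) hgt))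
      · rw [if_neg hgt]
        exact ih (x :: seen) st (by
          intro y hy; rcases List.mem_cons.1 hy with rfl | hy
          · exact not_lt.1 hgt
          · exact hseen y hy)

theorem pvBest_dedup {α : Type} [BEq α] [LawfulBEq α] (f : α → Int) (l : List α) (st : α × Int) :
    l.foldl (fun st x => if f x > st.2 then (x, f x) else st) st
      = (PySem.Set.ofList l).foldl (fun st x => if f x > st.2 then (x, f x) else st) st := by
  have h1 : PySem.Set.ofList l = pvRS ([] : List α) l := by
    have := pvOfList_eq_RS l ([] : List α)
    simpa [PySem.Set.ofList] using this
  rw [h1]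
  exact pvBest_RS f l [] st (by intro x hx; simp at hx)

theorem pvCompter_eq (l : List (List Char)) (e : List Char) :
    compterOccurencesDansListe l e = (l.count e : Int) := by
  unfold compterOccurencesDansListe
  rw [PySem.List.foldl_beq_add_one]
  simp

theorem trouverMeilleureSousChaineRepetee_spec : Claim_equal_trouverMeilleureSousChaineRepetee := by
  unfold Claim_equal_trouverMeilleureSousChaineRepetee Spec_trouverMeilleureSousChaineRepetee
  intro s _
  unfold trouverMeilleureSousChaineRepetee trouverMeilleureSousChaineRepetee_alt
  rw [pvRepetees_eq s.toList]
  set R := trouverSousChainesRepetees s.toList with hR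
  by_cases hempty : R = []
  · simp [hempty]
  · rw [if_neg hempty, if_neg hempty]
    simp only
    congr 1
    have hcounter : R.foldl (fun d s => d.insert s (d.getD s 0 + 1)) PySem.Dict.empty
        = PySem.Dict.counter R := PySem.Dict.foldl_insert_getD_add_one_eq_counter R
    rw [hcounter, PySem.Dict.items_counter, List.foldl_map]
    have hstep : (fun (st : List Char × Int) sousChaine =>
        if (compterOccurencesDansListe R sousChaine + 1) * (sousChaine.length : Int) > st.2
        then (sousChaine, (compterOccurencesDansListe R sousChaine + 1) * (sousChaine.length : Int))
        else st)
        = (fun (st : List Char × Int) x =>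
            if ((R.count x : Int) + 1) * (x.length : Int) > st.2
            then (x, ((R.count x : Int) + 1) * (x.length : Int)) else st) := by
      funext st x
      rw [pvCompter_eq]
    rw [hstep]
    exact congrArg Prod.fst (pvBest_dedup (fun x => ((R.count x : Int) + 1) * (x.length : Int)) R ([], -1))
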